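-- pv_equiv track=rewrite | github.com/amol-ship-it/agi-core | domains/arc/fingerprint.py | _detect_separators
-- ===== SOURCE A (Python) =====
-- def _detect_separators(grid: list[list[int]]) -> tuple[bool, int]:
--     """Detect uniform rows/cols that act as separators.
--
--     Returns (has_separators, n_sections).
--     """
--     if not grid or not grid[0]:
--         return False, 1
--     h, w = len(grid), len(grid[0])
--
--     # Check for uniform rows (all same color, different from adjacent rows)
--     sep_rows: list[int] = []
--     for r in range(h):
--         row = grid[r]
--         if len(set(row)) == 1:
--             # Check it's a separator (not just a normal content row)
--             color = row[0]
--             is_sep = False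
--             if r > 0 and any(grid[r-1][c] != color for c in range(w)):
--                 is_sep = True
--             if r < h - 1 and any(grid[r+1][c] != color for c in range(w)):
--                 is_sep = True
--             if is_sep:
--                 sep_rows.append(r)
--
--     # Check for uniform cols
--     sep_cols: list[int] = []
--     for c in range(w):
--         col_vals = [grid[r][c] for r in range(h)]
--         if len(set(col_vals)) == 1:
--             color = col_vals[0]
--             is_sep = False
--             if c > 0 and any(grid[r][c-1] != color for r in range(h)):
--                 is_sep = True
--             if c < w - 1 and any(grid[r][c+1] != color for r in range(h)):
--                 is_sep = True
--             if is_sep: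
--                 sep_cols.append(c)
--
--     has_sep = len(sep_rows) > 0 or len(sep_cols) > 0
--     # Sections = (row_sections) * (col_sections)
--     row_sections = len(sep_rows) + 1
--     col_sections = len(sep_cols) + 1
--     n_sections = max(row_sections, col_sections)
--     if sep_rows and sep_cols:
--         n_sections = row_sections * col_sections
--
--     return has_sep, n_sections
-- ===== SOURCE B (Python) =====
-- def _detect_separators(grid: list[list[int]]) -> tuple[bool, int]:
--     """Detect uniform rows/cols that act as separators. Returns (has_separators, n_sections)."""
--     if not grid or not grid[0]:
--         return False, 1
--     h, w = len(grid), len(grid[0])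
--     # One pass per axis: color of each uniform row/col, None if not uniform.
--     row_color = [row[0] if all(v == row[0] for v in row) else None for row in grid]
--     col_color = [grid[0][c] if all(grid[r][c] == grid[0][c] for r in range(h)) else None
--                  for c in range(w)]
--     # A uniform line is a separator iff some existing neighbor line differs in color.
--     sep_rows = [r for r in range(h)
--                 if row_color[r] is not None
--                 and ((r > 0 and row_color[r-1] != row_color[r])
--                      or (r < h - 1 and row_color[r+1] != row_color[r]))]
--     sep_cols = [c for c in range(w)
--                 if col_color[c] is not None
--                 and ((c > 0 and col_color[c-1] != col_color[c])
--                      or (c < w - 1 and col_color[c+1] != col_color[c]))]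
--     has_sep = bool(sep_rows) or bool(sep_cols)
--     row_sections = len(sep_rows) + 1
--     col_sections = len(sep_cols) + 1
--     n_sections = row_sections * col_sections if sep_rows and sep_cols else max(row_sections, col_sections)
--     return has_sep, n_sections
-- ===== Notes on version B (the rewrite author's own statement) =====
-- stated objective: faster
-- what changed: B precomputes per-row and per-column uniform-color tables (None if not uniform) in one pass per axis and decides separators by comparing neighboring table entries, removing A's O(h*w) neighbor re-scan per uniform line; the section arithmetic is unchanged.
-- outside the precondition, e.g. on _detect_separators([[5], [5, 7]]): A returns (False, 1), B returns (True, 2)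
import Mathlib
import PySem

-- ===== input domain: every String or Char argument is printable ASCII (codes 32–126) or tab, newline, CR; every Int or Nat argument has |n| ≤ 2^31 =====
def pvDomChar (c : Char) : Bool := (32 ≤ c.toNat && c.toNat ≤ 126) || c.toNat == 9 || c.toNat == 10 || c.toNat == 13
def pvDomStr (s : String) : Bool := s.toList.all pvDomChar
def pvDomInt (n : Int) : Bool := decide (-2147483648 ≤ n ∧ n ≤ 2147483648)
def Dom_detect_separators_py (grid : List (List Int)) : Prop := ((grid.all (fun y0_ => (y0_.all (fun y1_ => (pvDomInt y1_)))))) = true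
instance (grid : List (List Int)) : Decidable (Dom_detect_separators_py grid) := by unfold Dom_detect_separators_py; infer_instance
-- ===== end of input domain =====

-- B replaces A's per-uniform-line neighbor re-scans by uniform-color tables built once per axis; equivalence on rectangular grids (return value only).

-- ===== PORT A =====
def detect_separators_py (grid : List (List Int)) : Bool × Int :=
  if grid.isEmpty || (grid.headD []).isEmpty then (false, 1)
  else
    let h : Int := grid.length
    let w : Int := (grid.headD []).length
    let sep_rows : List Int := (PySem.List.pyRange 0 h 1).foldl (fun acc r =>
      let row := PySem.List.pyGetD grid r []
      if (PySem.Set.ofList row).length = 1 then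
        let color := PySem.List.pyGetD row 0 0
        let is_sep := false
        let is_sep := if decide (0 < r) && ((PySem.List.pyRange 0 w 1).any fun c =>
            PySem.List.pyGetD (PySem.List.pyGetD grid (r - 1) []) c 0 != color) then true else is_sep
        let is_sep := if decide (r < h - 1) && ((PySem.List.pyRange 0 w 1).any fun c =>
            PySem.List.pyGetD (PySem.List.pyGetD grid (r + 1) []) c 0 != color) then true else is_sep
        if is_sep then acc ++ [r] else acc
      else acc) []
    let sep_cols : List Int := (PySem.List.pyRange 0 w 1).foldl (fun acc c =>
      let col_vals : List Int := (PySem.List.pyRange 0 h 1).map (fun r =>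
        PySem.List.pyGetD (PySem.List.pyGetD grid r []) c 0)
      if (PySem.Set.ofList col_vals).length = 1 then
        let color := PySem.List.pyGetD col_vals 0 0
        let is_sep := false
        let is_sep := if decide (0 < c) && ((PySem.List.pyRange 0 h 1).any fun r =>
            PySem.List.pyGetD (PySem.List.pyGetD grid r []) (c - 1) 0 != color) then true else is_sep
        let is_sep := if decide (c < w - 1) && ((PySem.List.pyRange 0 h 1).any fun r =>
            PySem.List.pyGetD (PySem.List.pyGetD grid r []) (c + 1) 0 != color) then true else is_sep
        if is_sep then acc ++ [c] else acc
      else acc) []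
    let has_sep := decide (0 < sep_rows.length) || decide (0 < sep_cols.length)
    let row_sections : Int := sep_rows.length + 1
    let col_sections : Int := sep_cols.length + 1
    let n_sections := max row_sections col_sections
    let n_sections := if sep_rows ≠ [] ∧ sep_cols ≠ [] then row_sections * col_sections else n_sections
    (has_sep, n_sections)

-- ===== PORT B =====
-- B helper: color of a uniform line, none if the line is not uniform
def rowColor (row : List Int) : Option Int :=
  let c0 := PySem.List.pyGetD row 0 0
  if row.all (fun v => v == c0) then some c0 else none

def detect_separators_py_alt (grid : List (List Int)) : Bool × Int :=
  if grid.isEmpty || (grid.headD []).isEmpty then (false, 1)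
  else
    let h : Int := grid.length
    let w : Int := (grid.headD []).length
    let row_color : List (Option Int) := grid.map rowColor
    let col_color : List (Option Int) := (PySem.List.pyRange 0 w 1).map (fun c =>
      let c0 := PySem.List.pyGetD (grid.headD []) c 0
      if (PySem.List.pyRange 0 h 1).all (fun r =>
          PySem.List.pyGetD (PySem.List.pyGetD grid r []) c 0 == c0)
      then some c0 else none)
    let sep_rows : List Int := (PySem.List.pyRange 0 h 1).filter (fun r =>
      (PySem.List.pyGetD row_color r none).isSome &&
      ((decide (0 < r) && (PySem.List.pyGetD row_color (r - 1) none != PySem.List.pyGetD row_color r none)) ||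
       (decide (r < h - 1) && (PySem.List.pyGetD row_color (r + 1) none != PySem.List.pyGetD row_color r none))))
    let sep_cols : List Int := (PySem.List.pyRange 0 w 1).filter (fun c =>
      (PySem.List.pyGetD col_color c none).isSome &&
      ((decide (0 < c) && (PySem.List.pyGetD col_color (c - 1) none != PySem.List.pyGetD col_color c none)) ||
       (decide (c < w - 1) && (PySem.List.pyGetD col_color (c + 1) none != PySem.List.pyGetD col_color c none))))
    let has_sep := !sep_rows.isEmpty || !sep_cols.isEmpty
    let row_sections : Int := sep_rows.length + 1
    let col_sections : Int := sep_cols.length + 1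
    let n_sections := if !sep_rows.isEmpty && !sep_cols.isEmpty then row_sections * col_sections
                      else max row_sections col_sections
    (has_sep, n_sections)

-- ===== PRECONDITION & SPEC =====
-- Pre_ excludes ragged (non-rectangular) grids with a nonempty first row: there A raises IndexError when
-- a later row is shorter than the first, and on longer rows A's neighbor scan ignores the trailing cells
-- while B's uniform-row table reads the whole row, so the two values can differ.
def Pre_detect_separators_py (grid : List (List Int)) : Prop :=
  grid.headD [] = [] ∨ ∀ row ∈ grid, row.length = (grid.headD []).length
instance (grid : List (List Int)) : Decidable (Pre_detect_separators_py grid) := by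
  unfold Pre_detect_separators_py; infer_instance

def pvWitness_detect_separators_py : List (List Int) := [[1, 1, 1], [2, 0, 2], [1, 1, 1]]

def Spec_detect_separators_py (grid : List (List Int)) (out : Bool × Int) : Prop := out = detect_separators_py_alt grid
instance (grid : List (List Int)) (out : Bool × Int) : Decidable (Spec_detect_separators_py grid out) := by unfold Spec_detect_separators_py; infer_instance

-- ===== CLAIM (what is proved, stated in full; the proofs are below) =====
def Claim_equal_detect_separators_py : Prop := ∀ (grid : List (List Int)), Dom_detect_separators_py grid → Pre_detect_separators_py grid → Spec_detect_separators_py grid (detect_separators_py grid)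

-- ===== LEMMAS AND PROOFS =====

theorem rowColor_eq_some_iff (l : List Int) (hl : l ≠ []) (c : Int) :
    rowColor l = some c ↔ ∀ x ∈ l, x = c := by
  cases l with
  | nil => exact absurd rfl hl
  | cons a t =>
    simp only [rowColor, PySem.List.pyGetD_zero_cons, List.all_eq_true, beq_iff_eq]
    split_ifs with h
    · simp only [Option.some.injEq]
      constructor
      · rintro rfl x hx; exact h x hx
      · intro hall; exact hall a (by simp)
    · simp only [false_iff]
      intro hall
      exact h (fun x hx => (hall x hx).trans (hall a (by simp)).symm)

theorem isSome_rowColor_iff (l : List Int) (hl : l ≠ []) :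
    (rowColor l).isSome = true ↔ (PySem.Set.ofList l).length = 1 := by
  cases l with
  | nil => exact absurd rfl hl
  | cons a t =>
    have h1 : (rowColor (a :: t)).isSome = true ↔ ∀ x ∈ t, x = a := by
      simp only [rowColor, PySem.List.pyGetD_zero_cons]
      split_ifs with h
      · simp only [Option.isSome_some, true_iff]
        simp only [List.all_eq_true, beq_iff_eq] at h
        exact fun x hx => h x (by simp [hx])
      · simp only [Option.isSome_none, Bool.false_eq_true, false_iff]
        intro hall
        refine h ?_
        simp only [List.all_cons, beq_self_eq_true, Bool.true_and, List.all_eq_true, beq_iff_eq]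
        exact hall
    have h2 : (PySem.Set.ofList (a :: t)).length = 1 ↔ ∀ x ∈ t, x = a := by
      rw [PySem.Set.ofList_cons]
      have hlen : (PySem.Set.ofList (a :: t)).length = ((PySem.Set.ofList t).discard a).length + 1 := by
        rw [PySem.Set.ofList_cons]; simp
      constructor
      · intro hs x hx
        have hz : ((PySem.Set.ofList t).discard a).length = 0 := by
          simpa using hs
        have hd : (PySem.Set.ofList t).discard a = [] := List.length_eq_zero_iff.mp hz
        by_contra hxa
        have : x ∈ (PySem.Set.ofList t).discard a :=
          (PySem.Set.mem_discard _ _ _).mpr ⟨(PySem.Set.mem_ofList _ _).mpr hx, hxa⟩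
        simp [hd] at this
      · intro hs
        have hd : (PySem.Set.ofList t).discard a = [] := by
          rw [List.eq_nil_iff_forall_not_mem]
          intro y hy
          obtain ⟨hyt, hya⟩ := (PySem.Set.mem_discard _ _ _).mp hy
          exact hya (hs y ((PySem.Set.mem_ofList _ _).mp hyt))
        simp [hd]
    rw [h1, h2]

theorem anydiff_eq (nb : List Int) (w : Nat) (hlen : nb.length = w) (hw : 0 < w) (color : Int) :
    ((PySem.List.pyRange 0 (w : Int) 1).any fun c => PySem.List.pyGetD nb c 0 != color)
      = !(rowColor nb == some color) := by
  have hnb : nb ≠ [] := by intro e; simp [e] at hlen; omega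
  rw [Bool.eq_iff_iff]
  simp only [List.any_eq_true, PySem.List.mem_pyRange_one, bne_iff_ne, Bool.not_eq_true',
    beq_eq_false_iff_ne, ne_eq]
  rw [rowColor_eq_some_iff nb hnb color]
  constructor
  · rintro ⟨i, ⟨hi0, hiw⟩, hne⟩ hall
    have hib : i < (nb.length : Int) := by omega
    rw [PySem.List.pyGetD_eq_getElem nb 0 hi0 hib] at hne
    exact hne (hall _ (List.getElem_mem _))
  · intro h
    push Not at h
    obtain ⟨x, hx, hne⟩ := h
    obtain ⟨i, hi, rfl⟩ := List.mem_iff_getElem.mp hx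
    refine ⟨(i : Int), ⟨by positivity, by omega⟩, ?_⟩
    rw [PySem.List.pyGetD_eq_getElem nb 0 (by positivity) (by exact_mod_cast hi)]
    simpa using hne

theorem rowColor_eq_of_isSome (l : List Int) (h : (rowColor l).isSome = true) :
    rowColor l = some (PySem.List.pyGetD l 0 0) := by
  by_cases hc : (l.all fun v => v == PySem.List.pyGetD l 0 0) = true
  · simp [rowColor, hc]
  · simp [rowColor, hc] at h

theorem bodyA_eq (P : Prop) [Decidable P] (c1 c2 : Bool) (acc : List Int) (r : Int) :
    (if P then
       (if (if c2 then true else (if c1 then true else false)) then acc ++ [r] else acc)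
     else acc)
    = if (decide P && (c1 || c2)) then acc ++ [r] else acc := by
  by_cases hP : P <;> cases c1 <;> cases c2 <;> simp [hP]

theorem sep_rows_eq (grid : List (List Int)) (h0 : grid.headD [] ≠ [])
    (hrect : ∀ row ∈ grid, row.length = (grid.headD []).length) :
    ((PySem.List.pyRange 0 (grid.length : Int) 1).foldl (fun acc r =>
      let row := PySem.List.pyGetD grid r []
      if (PySem.Set.ofList row).length = 1 then
        let color := PySem.List.pyGetD row 0 0
        let is_sep := false
        let is_sep := if decide (0 < r) && ((PySem.List.pyRange 0 (((grid.headD []).length : Int)) 1).any fun c =>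
            PySem.List.pyGetD (PySem.List.pyGetD grid (r - 1) []) c 0 != color) then true else is_sep
        let is_sep := if decide (r < (grid.length : Int) - 1) && ((PySem.List.pyRange 0 (((grid.headD []).length : Int)) 1).any fun c =>
            PySem.List.pyGetD (PySem.List.pyGetD grid (r + 1) []) c 0 != color) then true else is_sep
        if is_sep then acc ++ [r] else acc
      else acc) ([] : List Int)) =
    ((PySem.List.pyRange 0 (grid.length : Int) 1).filter (fun r =>
      (PySem.List.pyGetD (grid.map rowColor) r none).isSome &&
      ((decide (0 < r) && (PySem.List.pyGetD (grid.map rowColor) (r - 1) none != PySem.List.pyGetD (grid.map rowColor) r none)) ||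
       (decide (r < (grid.length : Int) - 1) && (PySem.List.pyGetD (grid.map rowColor) (r + 1) none != PySem.List.pyGetD (grid.map rowColor) r none))))) := by
  have hw0 : 0 < (grid.headD []).length := List.length_pos_iff.mpr h0
  have hlenr : ∀ (i : Int), 0 ≤ i → i < (grid.length : Int) →
      (PySem.List.pyGetD grid i []).length = (grid.headD []).length := by
    intro i hi0 hi1
    rw [PySem.List.pyGetD_eq_getElem _ _ hi0 hi1]
    exact hrect _ (List.getElem_mem _)
  have hRC : ∀ (i : Int), 0 ≤ i → i < (grid.length : Int) →
      PySem.List.pyGetD (grid.map rowColor) i none = rowColor (PySem.List.pyGetD grid i []) := by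
    intro i hi0 hi1
    rw [PySem.List.pyGetD_eq_getElem _ _ hi0 (by simpa using hi1),
        PySem.List.pyGetD_eq_getElem _ _ hi0 hi1]
    simp
  rw [PySem.List.foldl_congr_mem _ _
      (fun acc r => if ((decide ((PySem.Set.ofList (PySem.List.pyGetD grid r [])).length = 1)) &&
        ((decide (0 < r) && ((PySem.List.pyRange 0 (((grid.headD []).length : Int)) 1).any fun c =>
            PySem.List.pyGetD (PySem.List.pyGetD grid (r - 1) []) c 0 != PySem.List.pyGetD (PySem.List.pyGetD grid r []) 0 0)) ||
         (decide (r < (grid.length : Int) - 1) && ((PySem.List.pyRange 0 (((grid.headD []).length : Int)) 1).any fun c =>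
            PySem.List.pyGetD (PySem.List.pyGetD grid (r + 1) []) c 0 != PySem.List.pyGetD (PySem.List.pyGetD grid r []) 0 0)))) then acc ++ [r] else acc)
      [] (fun acc r _ => bodyA_eq _ _ _ acc r)]
  rw [PySem.List.foldl_append_if_eq_filter]
  rw [List.nil_append]
  apply List.filter_congr
  intro r hr
  obtain ⟨hr0, hrh⟩ := PySem.List.mem_pyRange_one.mp hr
  have hrne : PySem.List.pyGetD grid r [] ≠ [] := by
    intro e
    have := hlenr r hr0 hrh
    rw [e] at this
    simp only [List.length_nil] at this
    omega
  rw [hRC r hr0 hrh]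
  by_cases hu : (PySem.Set.ofList (PySem.List.pyGetD grid r [])).length = 1
  · have hsome0 : (rowColor (PySem.List.pyGetD grid r [])).isSome = true :=
      (isSome_rowColor_iff _ hrne).mpr hu
    have hsome : rowColor (PySem.List.pyGetD grid r []) = some (PySem.List.pyGetD (PySem.List.pyGetD grid r []) 0 0) :=
      rowColor_eq_of_isSome _ hsome0
    rw [hsome]
    simp only [hu, decide_true, Option.isSome_some, Bool.true_and]
    congr 1
    · -- prev branch
      by_cases hp : 0 < r
      · simp only [hp, decide_true, Bool.true_and]
        rw [hRC (r-1) (by omega) (by omega)]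
        rw [anydiff_eq _ (grid.headD []).length (hlenr (r-1) (by omega) (by omega)) hw0]
        rfl
      · simp [hp]
    · -- next branch
      by_cases hp : r < (grid.length : Int) - 1
      · simp only [hp, decide_true, Bool.true_and]
        rw [hRC (r+1) (by omega) (by omega)]
        rw [anydiff_eq _ (grid.headD []).length (hlenr (r+1) (by omega) (by omega)) hw0]
        rfl
      · simp [hp]
  · have : (rowColor (PySem.List.pyGetD grid r [])).isSome = false := by
      rw [← Bool.not_eq_true, isSome_rowColor_iff _ hrne]
      exact hu
    simp [hu, this]

theorem getD_zero_headD (grid : List (List Int)) (hg : grid ≠ []) :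
    PySem.List.pyGetD grid 0 [] = grid.headD [] := by
  cases grid with
  | nil => exact absurd rfl hg
  | cons a t => simp [PySem.List.pyGetD_zero_cons]

theorem sep_cols_eq (grid : List (List Int)) (hg : grid ≠ []) :
    ((PySem.List.pyRange 0 (((grid.headD []).length : Int)) 1).foldl (fun acc c =>
      let col_vals : List Int := (PySem.List.pyRange 0 (grid.length : Int) 1).map (fun r =>
        PySem.List.pyGetD (PySem.List.pyGetD grid r []) c 0)
      if (PySem.Set.ofList col_vals).length = 1 then
        let color := PySem.List.pyGetD col_vals 0 0
        let is_sep := false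
        let is_sep := if decide (0 < c) && ((PySem.List.pyRange 0 (grid.length : Int) 1).any fun r =>
            PySem.List.pyGetD (PySem.List.pyGetD grid r []) (c - 1) 0 != color) then true else is_sep
        let is_sep := if decide (c < ((grid.headD []).length : Int) - 1) && ((PySem.List.pyRange 0 (grid.length : Int) 1).any fun r =>
            PySem.List.pyGetD (PySem.List.pyGetD grid r []) (c + 1) 0 != color) then true else is_sep
        if is_sep then acc ++ [c] else acc
      else acc) ([] : List Int)) =
    ((PySem.List.pyRange 0 (((grid.headD []).length : Int)) 1).filter (fun c =>
      (PySem.List.pyGetD ((PySem.List.pyRange 0 (((grid.headD []).length : Int)) 1).map (fun c =>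
        let c0 := PySem.List.pyGetD (grid.headD []) c 0
        if (PySem.List.pyRange 0 (grid.length : Int) 1).all (fun r =>
            PySem.List.pyGetD (PySem.List.pyGetD grid r []) c 0 == c0)
        then some c0 else none)) c none).isSome &&
      ((decide (0 < c) && (PySem.List.pyGetD ((PySem.List.pyRange 0 (((grid.headD []).length : Int)) 1).map (fun c =>
        let c0 := PySem.List.pyGetD (grid.headD []) c 0
        if (PySem.List.pyRange 0 (grid.length : Int) 1).all (fun r =>
            PySem.List.pyGetD (PySem.List.pyGetD grid r []) c 0 == c0)
        then some c0 else none)) (c - 1) none != PySem.List.pyGetD ((PySem.List.pyRange 0 (((grid.headD []).length : Int)) 1).map (fun c =>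
        let c0 := PySem.List.pyGetD (grid.headD []) c 0
        if (PySem.List.pyRange 0 (grid.length : Int) 1).all (fun r =>
            PySem.List.pyGetD (PySem.List.pyGetD grid r []) c 0 == c0)
        then some c0 else none)) c none)) ||
       (decide (c < ((grid.headD []).length : Int) - 1) && (PySem.List.pyGetD ((PySem.List.pyRange 0 (((grid.headD []).length : Int)) 1).map (fun c =>
        let c0 := PySem.List.pyGetD (grid.headD []) c 0
        if (PySem.List.pyRange 0 (grid.length : Int) 1).all (fun r =>
            PySem.List.pyGetD (PySem.List.pyGetD grid r []) c 0 == c0)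
        then some c0 else none)) (c + 1) none != PySem.List.pyGetD ((PySem.List.pyRange 0 (((grid.headD []).length : Int)) 1).map (fun c =>
        let c0 := PySem.List.pyGetD (grid.headD []) c 0
        if (PySem.List.pyRange 0 (grid.length : Int) 1).all (fun r =>
            PySem.List.pyGetD (PySem.List.pyGetD grid r []) c 0 == c0)
        then some c0 else none)) c none))))) := by
  have hh0 : 0 < grid.length := List.length_pos_iff.mpr hg
  have hhpos : (0:Int) < (grid.length : Int) := by exact_mod_cast hh0
  have hcvlen : ∀ (c : Int),
      ((PySem.List.pyRange 0 (grid.length : Int) 1).map (fun r =>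
        PySem.List.pyGetD (PySem.List.pyGetD grid r []) c 0)).length = grid.length := by
    intro c
    rw [List.length_map, PySem.List.length_pyRange_one]
    omega
  have hcvne : ∀ (c : Int),
      ((PySem.List.pyRange 0 (grid.length : Int) 1).map (fun r =>
        PySem.List.pyGetD (PySem.List.pyGetD grid r []) c 0)) ≠ [] := by
    intro c e
    have := hcvlen c
    rw [e] at this
    simp only [List.length_nil] at this
    omega
  -- the one-pass column table entry IS rowColor of the extracted column
  have hF : ∀ (c : Int),
      (let c0 := PySem.List.pyGetD (grid.headD []) c 0
       if (PySem.List.pyRange 0 (grid.length : Int) 1).all (fun r =>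
           PySem.List.pyGetD (PySem.List.pyGetD grid r []) c 0 == c0)
       then some c0 else none)
      = rowColor ((PySem.List.pyRange 0 (grid.length : Int) 1).map (fun r =>
          PySem.List.pyGetD (PySem.List.pyGetD grid r []) c 0)) := by
    intro c
    have hcons : PySem.List.pyRange 0 (grid.length : Int) 1 = 0 :: PySem.List.pyRange 1 (grid.length : Int) 1 :=
      PySem.List.pyRange_one_cons hhpos
    have hc0 : PySem.List.pyGetD ((PySem.List.pyRange 0 (grid.length : Int) 1).map (fun r =>
          PySem.List.pyGetD (PySem.List.pyGetD grid r []) c 0)) 0 0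
        = PySem.List.pyGetD (grid.headD []) c 0 := by
      rw [hcons, List.map_cons, PySem.List.pyGetD_zero_cons, getD_zero_headD grid hg]
    unfold rowColor
    rw [hc0]
    simp only [List.all_map, Function.comp_def]
  have hCC : ∀ (i : Int), 0 ≤ i → i < ((grid.headD []).length : Int) →
      PySem.List.pyGetD ((PySem.List.pyRange 0 (((grid.headD []).length : Int)) 1).map (fun c =>
        let c0 := PySem.List.pyGetD (grid.headD []) c 0
        if (PySem.List.pyRange 0 (grid.length : Int) 1).all (fun r =>
            PySem.List.pyGetD (PySem.List.pyGetD grid r []) c 0 == c0)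
        then some c0 else none)) i none
      = rowColor ((PySem.List.pyRange 0 (grid.length : Int) 1).map (fun r =>
          PySem.List.pyGetD (PySem.List.pyGetD grid r []) i 0)) := by
    intro i hi0 hi1
    rw [PySem.List.pyGetD_map_pyRange_of_nonneg _ _ _ _ hi0 hi1]
    exact hF i
  have hany : ∀ (j : Int) (color : Int),
      ((PySem.List.pyRange 0 (grid.length : Int) 1).any fun r =>
          PySem.List.pyGetD (PySem.List.pyGetD grid r []) j 0 != color)
      = !(rowColor ((PySem.List.pyRange 0 (grid.length : Int) 1).map (fun r =>
          PySem.List.pyGetD (PySem.List.pyGetD grid r []) j 0)) == some color) := by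
    intro j color
    rw [← anydiff_eq _ grid.length (hcvlen j) hh0 color]
    apply PySem.List.any_congr_mem
    intro k hk
    obtain ⟨hk0, hk1⟩ := PySem.List.mem_pyRange_one.mp hk
    rw [PySem.List.pyGetD_map_pyRange_of_nonneg _ _ _ _ hk0 hk1]
  rw [PySem.List.foldl_congr_mem _ _
      (fun acc c => if ((decide ((PySem.Set.ofList ((PySem.List.pyRange 0 (grid.length : Int) 1).map (fun r =>
          PySem.List.pyGetD (PySem.List.pyGetD grid r []) c 0))).length = 1)) &&
        ((decide (0 < c) && ((PySem.List.pyRange 0 (grid.length : Int) 1).any fun r =>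
            PySem.List.pyGetD (PySem.List.pyGetD grid r []) (c - 1) 0 !=
              PySem.List.pyGetD ((PySem.List.pyRange 0 (grid.length : Int) 1).map (fun r =>
                PySem.List.pyGetD (PySem.List.pyGetD grid r []) c 0)) 0 0)) ||
         (decide (c < ((grid.headD []).length : Int) - 1) && ((PySem.List.pyRange 0 (grid.length : Int) 1).any fun r =>
            PySem.List.pyGetD (PySem.List.pyGetD grid r []) (c + 1) 0 !=
              PySem.List.pyGetD ((PySem.List.pyRange 0 (grid.length : Int) 1).map (fun r =>
                PySem.List.pyGetD (PySem.List.pyGetD grid r []) c 0)) 0 0)))) then acc ++ [c] else acc)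
      [] (fun acc c _ => bodyA_eq _ _ _ acc c)]
  rw [PySem.List.foldl_append_if_eq_filter]
  rw [List.nil_append]
  apply List.filter_congr
  intro c hc
  obtain ⟨hc0, hcw⟩ := PySem.List.mem_pyRange_one.mp hc
  rw [hCC c hc0 hcw]
  by_cases hu : (PySem.Set.ofList ((PySem.List.pyRange 0 (grid.length : Int) 1).map (fun r =>
      PySem.List.pyGetD (PySem.List.pyGetD grid r []) c 0))).length = 1
  · have hsome0 := (isSome_rowColor_iff _ (hcvne c)).mpr hu
    have hsome := rowColor_eq_of_isSome _ hsome0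
    rw [hsome]
    simp only [hu, decide_true, Option.isSome_some, Bool.true_and]
    congr 1
    · by_cases hp : 0 < c
      · simp only [hp, decide_true, Bool.true_and]
        rw [hCC (c-1) (by omega) (by omega), hany (c-1) _]
        rfl
      · simp only [decide_eq_false hp, Bool.false_and]
    · by_cases hp : c < ((grid.headD []).length : Int) - 1
      · simp only [hp, decide_true, Bool.true_and]
        rw [hCC (c+1) (by omega) (by omega), hany (c+1) _]
        rfl
      · simp only [decide_eq_false hp, Bool.false_and]
  · have : (rowColor ((PySem.List.pyRange 0 (grid.length : Int) 1).map (fun r =>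
        PySem.List.pyGetD (PySem.List.pyGetD grid r []) c 0))).isSome = false := by
      rw [← Bool.not_eq_true, isSome_rowColor_iff _ (hcvne c)]
      exact hu
    simp [hu, this]

theorem tail_eq (l1 l2 : List Int) :
    ((decide (0 < l1.length) || decide (0 < l2.length),
      if l1 ≠ [] ∧ l2 ≠ [] then ((l1.length : Int) + 1) * ((l2.length : Int) + 1)
      else max ((l1.length : Int) + 1) ((l2.length : Int) + 1)) : Bool × Int)
    = (!l1.isEmpty || !l2.isEmpty,
       if !l1.isEmpty && !l2.isEmpty then ((l1.length : Int) + 1) * ((l2.length : Int) + 1)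
       else max ((l1.length : Int) + 1) ((l2.length : Int) + 1)) := by
  cases l1 <;> cases l2 <;> simp

-- ===== VERDICT (by name: the statement is the Claim_ definition above) =====
theorem detect_separators_py_spec : Claim_equal_detect_separators_py := by
  intro grid _ hpre
  unfold Spec_detect_separators_py detect_separators_py detect_separators_py_alt
  by_cases hemp : (grid.isEmpty || (grid.headD []).isEmpty) = true
  · rw [if_pos hemp, if_pos hemp]
  · rw [if_neg hemp, if_neg hemp]
    simp only [Bool.or_eq_true, List.isEmpty_iff, not_or] at hemp
    obtain ⟨hg, h0⟩ := hemp
    have hrect : ∀ row ∈ grid, row.length = (grid.headD []).length := by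
      cases hpre with
      | inl h => exact absurd h h0
      | inr h => exact h
    dsimp only
    rw [sep_rows_eq grid h0 hrect, sep_cols_eq grid hg]
    exact tail_eq _ _
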